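-- pv_equiv track=rewrite | github.com/mouredev/roadmap-retos-programacion | Roadmap/35 - REPARTIENDO LOS ANILLOS DE PODER/python/juanppdev.py | distribuir_anillos
-- ===== SOURCE A (Python) =====
-- def es_primo(num):
--     if num < 2:
--         return False
--     for i in range(2, int(num**0.5) + 1):
--         if num % i == 0:
--             return False
--     return True
--
-- def distribuir_anillos(total_anillos):
--     if total_anillos < 4:
--         return "No es posible distribuir los anillos con los requisitos dados."
--
--     # Sauron siempre recibe uno
--     sauron = 1
--     total_anillos -= sauron
--
--     # Distribuir los anillos restantes
--     elfos = 0
--     enanos = 0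
--     hombres = 0
--
--     for i in range(1, total_anillos + 1):
--         if i % 2 != 0:  # Número impar para los Elfos
--             elfos += 1
--         elif es_primo(i):  # Número primo para los Enanos
--             enanos += 1
--         else:  # Número par para los Hombres
--             hombres += 1
--
--     if elfos + enanos + hombres == total_anillos:
--         return f"Reparto final: Elfos: {elfos}, Enanos: {enanos}, Hombres: {hombres}, Sauron: {sauron}"
--     else:
--         return "No es posible distribuir los anillos con los requisitos dados."
-- ===== SOURCE B (Python) =====
-- def distribuir_anillos(total_anillos):
--     if total_anillos < 4:
--         return "No es posible distribuir los anillos con los requisitos dados."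
--     sauron = 1
--     rest = total_anillos - sauron
--     # Closed form: odd numbers 1..rest go to the elves, the single even prime to the
--     # dwarves, and every other even number to the men.
--     elfos = (rest + 1) // 2
--     enanos = 1
--     hombres = rest - elfos - 1
--     return f"Reparto final: Elfos: {elfos}, Enanos: {enanos}, Hombres: {hombres}, Sauron: {sauron}"
-- ===== Notes on version B (the rewrite author's own statement) =====
-- stated objective: faster
-- what changed: Replaced the O(N*sqrt(N)) counting loop with trial-division primality tests by a closed form: the odd ring numbers go to the elves, the single even prime to the dwarves, and the remaining even numbers to the men.
import Mathlib
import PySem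

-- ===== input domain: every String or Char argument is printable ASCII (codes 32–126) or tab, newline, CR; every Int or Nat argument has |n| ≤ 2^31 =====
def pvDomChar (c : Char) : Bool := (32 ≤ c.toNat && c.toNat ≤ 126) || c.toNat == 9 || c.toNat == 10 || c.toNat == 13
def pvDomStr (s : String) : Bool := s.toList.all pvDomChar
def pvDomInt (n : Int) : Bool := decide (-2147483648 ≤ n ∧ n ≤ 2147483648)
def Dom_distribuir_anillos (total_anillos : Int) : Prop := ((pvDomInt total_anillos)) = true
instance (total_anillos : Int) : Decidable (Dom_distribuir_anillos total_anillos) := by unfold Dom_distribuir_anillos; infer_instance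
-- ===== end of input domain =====

-- B replaces A's counting loop with trial-division primality tests by a closed form
-- (odd numbers → elves, the single even prime → dwarves, the other evens → men).

-- ===== PORT A =====
-- int(num**0.5) is ported as Nat.sqrt; exact on the domain |num| ≤ 2^31, where the
-- double-precision sqrt of a nonnegative integer truncates to the integer square root.
def es_primo (num : Int) : Bool :=
  if num < 2 then false
  else (PySem.List.pyRange 2 ((Nat.sqrt num.toNat : Int) + 1) 1).all
    (fun i => !(PySem.Int.mod num i == 0))

def distribuir_anillos (total_anillos : Int) : String :=
  if total_anillos < 4 then
    "No es posible distribuir los anillos con los requisitos dados."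
  else
    let sauron : Int := 1
    let total := total_anillos - sauron
    let s := (PySem.List.pyRange 1 (total + 1) 1).foldl
      (fun (s : Int × Int × Int) i =>
        if !(PySem.Int.mod i 2 == 0) then (s.1 + 1, s.2.1, s.2.2)
        else if es_primo i then (s.1, s.2.1 + 1, s.2.2)
        else (s.1, s.2.1, s.2.2 + 1)) (0, 0, 0)
    if s.1 + s.2.1 + s.2.2 = total then
      "Reparto final: Elfos: " ++ PySem.Int.toStr s.1 ++ ", Enanos: " ++ PySem.Int.toStr s.2.1
        ++ ", Hombres: " ++ PySem.Int.toStr s.2.2 ++ ", Sauron: " ++ PySem.Int.toStr sauron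
    else
      "No es posible distribuir los anillos con los requisitos dados."

-- ===== PORT B =====
def distribuir_anillos_alt (total_anillos : Int) : String :=
  if total_anillos < 4 then
    "No es posible distribuir los anillos con los requisitos dados."
  else
    let sauron : Int := 1
    let rest := total_anillos - sauron
    let elfos := PySem.Int.floordiv (rest + 1) 2
    let enanos : Int := 1
    let hombres := rest - elfos - 1
    "Reparto final: Elfos: " ++ PySem.Int.toStr elfos ++ ", Enanos: " ++ PySem.Int.toStr enanos
      ++ ", Hombres: " ++ PySem.Int.toStr hombres ++ ", Sauron: " ++ PySem.Int.toStr sauron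

-- ===== PRECONDITION & SPEC =====
def Spec_distribuir_anillos (total_anillos : Int) (out : String) : Prop := out = distribuir_anillos_alt total_anillos
instance (total_anillos : Int) (out : String) : Decidable (Spec_distribuir_anillos total_anillos out) := by unfold Spec_distribuir_anillos; infer_instance

-- ===== CLAIM (what is proved, stated in full; the proofs are below) =====
def Claim_equal_distribuir_anillos : Prop := ∀ (total_anillos : Int), Dom_distribuir_anillos total_anillos → Spec_distribuir_anillos total_anillos (distribuir_anillos total_anillos)

-- ===== LEMMAS AND PROOFS =====

theorem pv_sqrt_two : Nat.sqrt 2 = 1 := by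
  have h1 : 1 ≤ Nat.sqrt 2 := Nat.le_sqrt.mpr (by norm_num)
  have h2 : Nat.sqrt 2 < 2 := Nat.sqrt_lt.mpr (by norm_num)
  omega

theorem es_primo_two : es_primo 2 = true := by
  unfold es_primo
  rw [if_neg (by norm_num)]
  have : ((2 : Int).toNat) = 2 := rfl
  rw [this, pv_sqrt_two]
  rw [PySem.List.pyRange_one_eq_nil (by norm_num)]
  rfl

theorem es_primo_even_false (i : Int) (h4 : 4 ≤ i) (he : PySem.Int.mod i 2 = 0) :
    es_primo i = false := by
  unfold es_primo
  rw [if_neg (by omega)]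
  have hs : 2 ≤ Nat.sqrt i.toNat := Nat.le_sqrt.mpr (by omega)
  rw [PySem.List.pyRange_one_cons (by exact_mod_cast by omega), List.all_cons]
  rw [show (!(PySem.Int.mod i 2 == 0)) = false by rw [he]; rfl, Bool.false_and]

def pvStep (s : Int × Int × Int) (i : Int) : Int × Int × Int :=
  if !(PySem.Int.mod i 2 == 0) then (s.1 + 1, s.2.1, s.2.2)
  else if es_primo i then (s.1, s.2.1 + 1, s.2.2)
  else (s.1, s.2.1, s.2.2 + 1)

theorem pv_loop (k : Nat) (h2 : 2 ≤ k) :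
    (PySem.List.pyRange 1 ((k : Int) + 1) 1).foldl pvStep (0, 0, 0)
      = ((((k + 1) / 2 : Nat) : Int), (1 : Int), ((k / 2 - 1 : Nat) : Int)) := by
  induction k with
  | zero => omega
  | succ m ih =>
    by_cases hm : 2 ≤ m
    · have hcast : ((m + 1 : Nat) : Int) + 1 = ((m : Int) + 1) + 1 := by push_cast; ring
      rw [hcast, PySem.List.pyRange_one_succ_right (by omega), List.foldl_append, ih hm]
      have hmod : PySem.Int.mod ((m : Int) + 1) 2 = ((m : Int) + 1) % 2 :=
        PySem.Int.mod_eq_emod_of_pos (by norm_num)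
      by_cases hodd : (m + 1) % 2 = 1
      · -- odd: elves
        have : PySem.Int.mod ((m : Int) + 1) 2 = 1 := by rw [hmod]; omega
        simp only [List.foldl_cons, List.foldl_nil, pvStep, this]
        norm_num
        constructor
        · omega
        · omega
      · -- even, ≥ 4: men (es_primo false)
        have hev : (m + 1) % 2 = 0 := by omega
        have hmz : PySem.Int.mod ((m : Int) + 1) 2 = 0 := by rw [hmod]; omega
        have hnp : es_primo ((m : Int) + 1) = false :=
          es_primo_even_false _ (by omega) hmz
        simp only [List.foldl_cons, List.foldl_nil, pvStep, hmz, hnp]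
        norm_num
        constructor
        · omega
        · omega
    · -- base: m + 1 = 2 (since 2 ≤ m + 1)
      have hm2 : m = 1 := by omega
      subst hm2
      have : ((2 : Nat) : Int) + 1 = (3 : Int) := by norm_num
      rw [this]
      have hr : PySem.List.pyRange 1 3 1 = [1, 2] := by
        rw [PySem.List.pyRange_one_cons (by norm_num),
            PySem.List.pyRange_one_cons (by norm_num),
            PySem.List.pyRange_one_eq_nil (by norm_num)]
        norm_num
      have hm1 : PySem.Int.mod 1 2 = 1 := by
        rw [PySem.Int.mod_eq_emod_of_pos (by norm_num)]; decide
      have hm2 : PySem.Int.mod 2 2 = 0 := by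
        rw [PySem.Int.mod_eq_emod_of_pos (by norm_num)]; decide
      rw [hr]
      simp only [List.foldl_cons, List.foldl_nil, pvStep, hm1, hm2, es_primo_two]
      norm_num

-- ===== VERDICT (by name: the statement is the Claim_ definition above) =====
theorem distribuir_anillos_spec : Claim_equal_distribuir_anillos := by
  intro n _
  unfold Spec_distribuir_anillos distribuir_anillos distribuir_anillos_alt
  by_cases h4 : n < 4
  · rw [if_pos h4, if_pos h4]
  · rw [if_neg h4, if_neg h4]
    have hk : ∃ k : Nat, (k : Int) = n - 1 ∧ 3 ≤ k := ⟨(n - 1).toNat, by omega, by omega⟩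
    obtain ⟨k, hkn, hk3⟩ := hk
    have hloop := pv_loop k (by omega)
    simp only []
    rw [show n - 1 + 1 = (k : Int) + 1 by omega]
    rw [show ((PySem.List.pyRange 1 ((k : Int) + 1) 1).foldl
      (fun (s : Int × Int × Int) i =>
        if !(PySem.Int.mod i 2 == 0) then (s.1 + 1, s.2.1, s.2.2)
        else if es_primo i then (s.1, s.2.1 + 1, s.2.2)
        else (s.1, s.2.1, s.2.2 + 1)) (0, 0, 0))
      = (PySem.List.pyRange 1 ((k : Int) + 1) 1).foldl pvStep (0, 0, 0) from rfl]
    rw [hloop]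
    have hsum : (((k + 1) / 2 : Nat) : Int) + (1 : Int) + ((k / 2 - 1 : Nat) : Int) = n - 1 := by
      have hnat : (k + 1) / 2 + 1 + (k / 2 - 1) = k := by omega
      rw [← hkn]
      exact_mod_cast hnat
    rw [if_pos hsum]
    have he : PySem.Int.floordiv ((k : Int) + 1) 2 = (((k + 1) / 2 : Nat) : Int) := by
      rw [PySem.Int.floordiv_eq_ediv_of_pos (by norm_num)]
      push_cast
      omega
    have hh : n - 1 - PySem.Int.floordiv ((k : Int) + 1) 2 - 1 = ((k / 2 - 1 : Nat) : Int) := by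
      rw [he]; push_cast; omega
    rw [hh, he]
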